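-- pv_equiv track=rewrite | github.com/bam0/ProjectEulerProblems | Problems_41-60/P46_Goldbach_Other_Con.py | solution
-- ===== SOURCE A (Python) =====
-- def prime_sieve(n):
--     L = [True]*n
--     L[0] = L[1] = False
--     for i, is_prime in enumerate(L):
--         if is_prime:
--             yield i
--             for x in range(i*i, n, i):
--                 L[x] = False
--
-- def solution(limit):
--     primes = set(prime_sieve(limit))      # Create prime set
--     x, sq = 1, []                         # Initialize double-square set
--     while 2*x*x <= limit:
--         sq.append(2*x*x)                  # Add the double-squares
--         x+=1
--     num = 9
--     while num < limit:                    # Iterate over odd numbers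
--         i, k = 0, 1
--         if num not in primes:             # If it's composite, start subtracting
--             while sq[i] < num:            # double-squares
--                 if num-sq[i] in primes:   # If it's prime, move on
--                     k = 0
--                     break
--                 i+=1
--             if k:                         # Otherwise, the number is found
--                 return num
--         num += 2
-- ===== SOURCE B (Python) =====
-- def solution(limit):
--     size = max(limit, 2)
--     prime = [True] * size
--     prime[0] = prime[1] = False
--     for i in range(2, limit):
--         if prime[i]:
--             for j in range(i * i, limit, i):
--                 prime[j] = False
--     expressible = [False] * size
--     for p in range(2, limit):
--         if prime[p]:
--             x = 1
--             while p + 2 * x * x < limit: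
--                 expressible[p + 2 * x * x] = True
--                 x += 1
--     for num in range(9, limit, 2):
--         if not prime[num] and not expressible[num]:
--             return num
--     return None
-- ===== Notes on version B (the rewrite author's own statement) =====
-- stated objective: alternative
-- what changed: B replaces A's per-candidate scan over a square list with set lookups by a precomputed boolean 'expressible' table (marking p+2x^2 for every sieved prime p) and a single final sweep over odd numbers; the prime set becomes a boolean sieve array.
-- outside the precondition, e.g. on solution(5778): A raises IndexError, B returns 5777; on solution(5831): A raises IndexError, B returns 5777; on solution(0): A raises IndexError, B returns None
import Mathlib
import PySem

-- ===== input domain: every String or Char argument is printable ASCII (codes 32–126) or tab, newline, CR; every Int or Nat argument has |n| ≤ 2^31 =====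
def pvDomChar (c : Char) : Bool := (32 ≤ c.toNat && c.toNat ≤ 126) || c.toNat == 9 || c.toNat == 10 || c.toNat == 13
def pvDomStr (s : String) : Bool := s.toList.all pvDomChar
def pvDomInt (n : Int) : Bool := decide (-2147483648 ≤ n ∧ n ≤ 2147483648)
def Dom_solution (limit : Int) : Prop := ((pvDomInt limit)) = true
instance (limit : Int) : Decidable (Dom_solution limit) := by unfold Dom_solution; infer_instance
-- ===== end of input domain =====

-- B replaces A's per-candidate scan over a double-square list with a precomputed boolean
-- 'expressible' table and one final sweep; proved to return A's exact value wherever A returns.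

-- ===== PORT A =====
-- termination helper for the square loops
theorem le_two_mul_sq (x : Nat) : x ≤ 2 * x * x := by
  rcases Nat.eq_zero_or_pos x with rfl | hx
  · simp
  · have h : 1 * x ≤ 2 * x * x := Nat.mul_le_mul (by omega) (le_refl x)
    simpa using h

-- `for x in range(i*i, n, i): L[x] = False`  (shared by both Pythons' sieves); the `0 < step`
-- conjunct only makes the recursion total — the sieve never calls it with step = 0.
def markFrom (L : Array Bool) (x step n : Nat) : Array Bool :=
  if _h : x < n ∧ 0 < step then markFrom (L.setIfInBounds x false) (x + step) step n else L
termination_by n - x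
decreasing_by omega

-- one step of `for i, is_prime in enumerate(L): if is_prime: yield i; for x in range(i*i, n, i): …`
def sieveStepA (n : Nat) (st : Array Bool × List Nat) (i : Nat) : Array Bool × List Nat :=
  if st.1.getD i false then (markFrom st.1 (i * i) i n, st.2 ++ [i]) else st

-- prime_sieve(n): final marking array and the list of yielded primes
def sieveA (n : Nat) : Array Bool × List Nat :=
  (List.range n).foldl (sieveStepA n) ((((Array.replicate n true).setIfInBounds 0 false).setIfInBounds 1 false), [])

-- `x, sq = 1, []; while 2*x*x <= limit: sq.append(2*x*x); x += 1`
def sqList (n x : Nat) : List Nat :=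
  if h : 2 * x * x ≤ n then (2 * x * x) :: sqList n (x + 1) else []
termination_by n + 1 - x
decreasing_by
  have hx := le_two_mul_sq x
  omega

-- inner `while sq[i] < num: …` returning k; `[]` is where Python raises IndexError (outside Pre_)
def scanSq (primes : PySem.Set Nat) (num : Nat) : List Nat → Bool
  | [] => true
  | s :: rest =>
    if s < num then
      if PySem.Set.contains primes (num - s) then false else scanSq primes num rest
    else true

-- `num = 9; while num < limit: … num += 2`
def outerA (n : Nat) (primes : PySem.Set Nat) (sq : List Nat) (num : Nat) : Option Int :=
  if h : num < n then
    if PySem.Set.contains primes num then outerA n primes sq (num + 2)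
    else if scanSq primes num sq then some (num : Int)
    else outerA n primes sq (num + 2)
  else none
termination_by n - num
decreasing_by all_goals omega

-- limit.toNat: for limit < 0 Python's [True]*limit is [] and range/while loops are empty, same as toNat = 0
def solution (limit : Int) : Option Int :=
  let n := limit.toNat
  outerA n (PySem.Set.ofList (sieveA n).2) (sqList n 1) 9

-- ===== PORT B =====
-- one step of Source B's `for i in range(2, limit): if prime[i]: for j in range(i*i, limit, i): …`
def sieveStepB (n : Nat) (L : Array Bool) (i : Nat) : Array Bool :=
  if L.getD i false then markFrom L (i * i) i n else L

-- Source B's sieve; range(2, limit) = the naturals 2 .. n-1 (empty when limit < 2, like List.range' 2 (n-2))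
def sieveB (n : Nat) : Array Bool :=
  (List.range' 2 (n - 2)).foldl (sieveStepB n) (((Array.replicate (max n 2) true).setIfInBounds 0 false).setIfInBounds 1 false)

-- `x = 1; while p + 2*x*x < limit: expressible[p + 2*x*x] = True; x += 1`
def markExpr (e : Array Bool) (p n x : Nat) : Array Bool :=
  if h : p + 2 * x * x < n then markExpr (e.setIfInBounds (p + 2 * x * x) true) p n (x + 1) else e
termination_by n - x
decreasing_by
  have hx := le_two_mul_sq x
  omega

-- `expressible = [False]*size; for p in range(2, limit): if prime[p]: …`
def exprB (n : Nat) (prime : Array Bool) : Array Bool :=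
  (List.range' 2 (n - 2)).foldl (fun e p => if prime.getD p false then markExpr e p n 1 else e)
    (Array.replicate (max n 2) false)

def solution_alt (limit : Int) : Option Int :=
  let n := limit.toNat
  let prime := sieveB n
  let expr := exprB n prime
  (PySem.List.pyRange 9 limit 2).find?
    (fun num => !prime.getD num.toNat false && !expr.getD num.toNat false)

-- ===== PRECONDITION & SPEC =====
-- Pre_ excludes exactly the inputs on which Python A raises IndexError: limit < 2 (the sieve's
-- L[1] assignment) and 5778 ≤ limit ≤ 5831 (the inner scan runs past the end of sq at num = 5777,
-- because the largest double-square ≤ limit is 2*53² = 5618 < 5777 while 2*54² = 5832 > limit).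
def Pre_solution (limit : Int) : Prop := 2 ≤ limit ∧ (limit < 5778 ∨ 5832 ≤ limit)
instance (limit : Int) : Decidable (Pre_solution limit) := by unfold Pre_solution; infer_instance
def pvWitness_solution : Int := 30

def Spec_solution (limit : Int) (out : Option Int) : Prop := out = solution_alt limit
instance (limit : Int) (out : Option Int) : Decidable (Spec_solution limit out) := by unfold Spec_solution; infer_instance

-- ===== CLAIM (what is proved, stated in full; the proofs are below) =====
def Claim_equal_solution : Prop := ∀ (limit : Int), Dom_solution limit → Pre_solution limit → Spec_solution limit (solution limit)

-- ===== LEMMAS AND PROOFS =====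

theorem set_getD_ne {L : Array Bool} {i j : Nat} {v d : Bool} (h : i ≠ j) :
    (L.setIfInBounds i v).getD j d = L.getD j d := by
  simp [Array.getD_eq_getD_getElem?, h]

theorem set_getD_self {L : Array Bool} {i : Nat} {v d : Bool} (h : i < L.size) :
    (L.setIfInBounds i v).getD i d = v := by
  simp [Array.getD_eq_getD_getElem?, h]

theorem getD_true_lt {L : Array Bool} {m : Nat} (h : L.getD m false = true) : m < L.size := by
  by_contra hc
  rw [Array.getD_eq_getD_getElem?, Array.getElem?_eq_none (by omega)] at h
  simp at h

theorem markFrom_size (L : Array Bool) (x step n : Nat) :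
    (markFrom L x step n).size = L.size := by
  unfold markFrom
  split
  · rw [markFrom_size]; simp
  · rfl
termination_by n - x
decreasing_by omega

theorem markFrom_getD_lt (L : Array Bool) (x step n j : Nat) (d : Bool) (h : j < x) :
    (markFrom L x step n).getD j d = L.getD j d := by
  unfold markFrom
  split
  · rename_i hc
    rw [markFrom_getD_lt _ _ _ _ _ _ (by omega), set_getD_ne (by omega)]
  · rfl
termination_by n - x
decreasing_by omega

theorem sqList_mem (n x s : Nat) :
    s ∈ sqList n x ↔ ∃ t, x ≤ t ∧ s = 2 * t * t ∧ s ≤ n := by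
  unfold sqList
  split
  · rename_i hc
    rw [List.mem_cons, sqList_mem]
    constructor
    · rintro (rfl | ⟨t, ht, rfl, hs⟩)
      · exact ⟨x, le_refl _, rfl, hc⟩
      · exact ⟨t, by omega, rfl, hs⟩
    · rintro ⟨t, ht, rfl, hs⟩
      rcases Nat.eq_or_lt_of_le ht with rfl | hlt
      · exact Or.inl rfl
      · exact Or.inr ⟨t, by omega, rfl, hs⟩
  · rename_i hc
    simp only [List.not_mem_nil, false_iff]
    rintro ⟨t, ht, rfl, hs⟩
    have : 2 * x * x ≤ 2 * t * t := by nlinarith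
    omega
termination_by n + 1 - x
decreasing_by
  have hx := le_two_mul_sq x
  omega

theorem scanSq_sqList (primes : PySem.Set Nat) (num n x : Nat) :
    scanSq primes num (sqList n x) = true ↔
      ¬ ∃ s ∈ sqList n x, s < num ∧ PySem.Set.contains primes (num - s) = true := by
  rw [sqList]
  split
  · rename_i hc
    simp only [scanSq]
    by_cases hlt : 2 * x * x < num
    · rw [if_pos hlt]
      by_cases hp : PySem.Set.contains primes (num - 2 * x * x) = true
      · rw [if_pos hp]
        simp only [Bool.false_eq_true, false_iff, not_not]
        exact ⟨2 * x * x, List.mem_cons_self, hlt, hp⟩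
      · rw [if_neg hp, scanSq_sqList primes num n (x + 1)]
        apply not_congr
        constructor
        · rintro ⟨s, hs, hslt, hcont⟩
          exact ⟨s, List.mem_cons_of_mem _ hs, hslt, hcont⟩
        · rintro ⟨s, hs, hslt, hcont⟩
          rcases List.mem_cons.mp hs with rfl | hs'
          · exact absurd hcont hp
          · exact ⟨s, hs', hslt, hcont⟩
    · rw [if_neg hlt]
      simp only [true_iff]
      rintro ⟨s, hs, hslt, -⟩
      rcases List.mem_cons.mp hs with rfl | hs'
      · omega
      · obtain ⟨t, ht, rfl, -⟩ := (sqList_mem n (x + 1) s).mp hs'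
        have : 2 * x * x ≤ 2 * t * t := by nlinarith
        omega
  · simp [scanSq]
termination_by n + 1 - x
decreasing_by
  have hx := le_two_mul_sq x
  omega

theorem markExpr_size (e : Array Bool) (p n x : Nat) :
    (markExpr e p n x).size = e.size := by
  unfold markExpr
  split
  · rw [markExpr_size]; simp
  · rfl
termination_by n - x
decreasing_by
  have hx := le_two_mul_sq x
  omega

theorem markExpr_getD (e : Array Bool) (p n x j : Nat) (hlen : n ≤ e.size) :
    ((markExpr e p n x).getD j false = true ↔
      e.getD j false = true ∨ ∃ t, x ≤ t ∧ p + 2 * t * t = j ∧ j < n) := by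
  rw [markExpr]
  split
  · rename_i hc
    rw [markExpr_getD _ _ _ _ _ (by rw [Array.size_setIfInBounds]; exact hlen)]
    by_cases hj : j = p + 2 * x * x
    · subst hj
      rw [set_getD_self (by omega)]
      constructor
      · intro _
        exact Or.inr ⟨x, le_refl x, rfl, hc⟩
      · intro _
        exact Or.inl rfl
    · rw [set_getD_ne (fun he => hj he.symm)]
      constructor
      · rintro (he | ⟨t, ht, rfl, hn⟩)
        · exact Or.inl he
        · exact Or.inr ⟨t, by omega, rfl, hn⟩
      · rintro (he | ⟨t, ht, rfl, hn⟩)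
        · exact Or.inl he
        · rcases Nat.eq_or_lt_of_le ht with rfl | hlt
          · exact absurd rfl hj
          · exact Or.inr ⟨t, by omega, rfl, hn⟩
  · rename_i hc
    constructor
    · exact Or.inl
    · rintro (he | ⟨t, ht, rfl, hn⟩)
      · exact he
      · have : 2 * x * x ≤ 2 * t * t := by nlinarith
        omega
termination_by n - x
decreasing_by
  have hx := le_two_mul_sq x
  omega

-- the two sieve folds compute the same array
theorem fold_fst_eq (n : Nat) (l : List Nat) (L : Array Bool) (ps : List Nat) :
    (l.foldl (sieveStepA n) (L, ps)).1 = l.foldl (sieveStepB n) L := by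
  induction l generalizing L ps with
  | nil => rfl
  | cons i t ih =>
    simp only [List.foldl_cons]
    by_cases h : L.getD i false
    · rw [show sieveStepA n (L, ps) i = (markFrom L (i * i) i n, ps ++ [i]) by unfold sieveStepA; exact if_pos h,
        show sieveStepB n L i = markFrom L (i * i) i n by unfold sieveStepB; exact if_pos h]
      exact ih _ _
    · rw [show sieveStepA n (L, ps) i = (L, ps) by unfold sieveStepA; exact if_neg h,
        show sieveStepB n L i = L by unfold sieveStepB; exact if_neg h]
      exact ih _ _

theorem fold_fst_size (n : Nat) (l : List Nat) (L : Array Bool) (ps : List Nat) :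
    (l.foldl (sieveStepA n) (L, ps)).1.size = L.size := by
  induction l generalizing L ps with
  | nil => rfl
  | cons i t ih =>
    simp only [List.foldl_cons]
    by_cases h : L.getD i false
    · rw [show sieveStepA n (L, ps) i = (markFrom L (i * i) i n, ps ++ [i]) by unfold sieveStepA; exact if_pos h]
      rw [ih]; exact markFrom_size _ _ _ _
    · rw [show sieveStepA n (L, ps) i = (L, ps) by unfold sieveStepA; exact if_neg h]
      exact ih _ _

-- the sieve-fold invariant: the yielded list is exactly the true entries below the cursor,
-- and entries below the start of the remaining range never change again
theorem sieve_inv (n k : Nat) : ∀ (a : Nat) (L : Array Bool) (ps : List Nat), 2 ≤ a →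
    (∀ j, j ∈ ps ↔ (j < a ∧ L.getD j false = true)) →
    (∀ j, j ∈ ((List.range' a k).foldl (sieveStepA n) (L, ps)).2 ↔
        (j < a + k ∧ ((List.range' a k).foldl (sieveStepA n) (L, ps)).1.getD j false = true))
    ∧ (∀ j d, j < a → ((List.range' a k).foldl (sieveStepA n) (L, ps)).1.getD j d = L.getD j d) := by
  induction k with
  | zero =>
    intro a L ps ha hinv
    refine ⟨fun j => ?_, fun j d _ => rfl⟩
    rw [List.range'_zero, List.foldl_nil]
    simpa using hinv j
  | succ k ih =>
    intro a L ps ha hinv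
    rw [List.range'_succ, List.foldl_cons]
    have haa : a < a * a := lt_of_lt_of_le (by omega) (Nat.mul_le_mul_right a (by omega : 2 ≤ a))
    by_cases hLa : L.getD a false = true
    · rw [show sieveStepA n (L, ps) a = (markFrom L (a * a) a n, ps ++ [a]) by
        unfold sieveStepA; exact if_pos hLa]
      have hkey : ∀ j, j < a + 1 → ∀ d, (markFrom L (a * a) a n).getD j d = L.getD j d :=
        fun j hj d => markFrom_getD_lt L (a * a) a n j d (by omega)
      have hinv' : ∀ j, j ∈ ps ++ [a] ↔ (j < a + 1 ∧ (markFrom L (a * a) a n).getD j false = true) := by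
        intro j
        rw [List.mem_append, List.mem_singleton, hinv j]
        constructor
        · rintro (⟨hja, hLj⟩ | rfl)
          · exact ⟨by omega, by rw [hkey j (by omega)]; exact hLj⟩
          · exact ⟨by omega, by rw [hkey j (by omega)]; exact hLa⟩
        · rintro ⟨hj, hLj⟩
          rw [hkey j hj] at hLj
          rcases Nat.lt_succ_iff_lt_or_eq.mp hj with hja | rfl
          · exact Or.inl ⟨hja, hLj⟩
          · exact Or.inr rfl
      obtain ⟨hmem, hstab⟩ := ih (a + 1) (markFrom L (a * a) a n) (ps ++ [a]) (by omega) hinv'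
      refine ⟨fun j => ?_, fun j d hj => ?_⟩
      · rw [hmem j]
        constructor <;> rintro ⟨h1, h2⟩ <;> exact ⟨by omega, h2⟩
      · rw [hstab j d (by omega), hkey j (by omega)]
    · rw [show sieveStepA n (L, ps) a = (L, ps) by unfold sieveStepA; exact if_neg hLa]
      have hinv' : ∀ j, j ∈ ps ↔ (j < a + 1 ∧ L.getD j false = true) := by
        intro j
        rw [hinv j]
        constructor
        · rintro ⟨hja, hLj⟩; exact ⟨by omega, hLj⟩
        · rintro ⟨hj, hLj⟩
          rcases Nat.lt_succ_iff_lt_or_eq.mp hj with hja | rfl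
          · exact ⟨hja, hLj⟩
          · exact absurd hLj hLa
      obtain ⟨hmem, hstab⟩ := ih (a + 1) L ps (by omega) hinv'
      refine ⟨fun j => ?_, fun j d hj => hstab j d (by omega)⟩
      rw [hmem j]
      constructor <;> rintro ⟨h1, h2⟩ <;> exact ⟨by omega, h2⟩

theorem initA_getD_lt2 (n j : Nat) (h : 2 ≤ n) (hj : j < 2) (d : Bool) :
    ((((Array.replicate n true).setIfInBounds 0 false).setIfInBounds 1 false)).getD j d = false := by
  interval_cases j
  · rw [set_getD_ne (by omega), set_getD_self (by simp; omega)]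
  · rw [set_getD_self (by simp; omega)]

theorem sieveA_eq_range' (n : Nat) (h : 2 ≤ n) :
    sieveA n = (List.range' 2 (n - 2)).foldl (sieveStepA n)
      ((((Array.replicate n true).setIfInBounds 0 false).setIfInBounds 1 false), []) := by
  unfold sieveA
  rw [List.range_eq_range']
  have hsplit : List.range' 0 n = List.range' 0 2 ++ List.range' 2 (n - 2) := by
    have := List.range'_append (s := 0) (m := 2) (n := n - 2) (step := 1)
    simp at this
    rw [this]
    congr 1
    omega
  rw [hsplit, List.foldl_append]
  congr 1
  rw [show List.range' 0 2 = [0, 1] from rfl]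
  simp only [List.foldl_cons, List.foldl_nil]
  rw [show sieveStepA n ((((Array.replicate n true).setIfInBounds 0 false).setIfInBounds 1 false), ([] : List Nat)) 0
        = ((((Array.replicate n true).setIfInBounds 0 false).setIfInBounds 1 false), ([] : List Nat)) by
      unfold sieveStepA
      exact if_neg (by rw [initA_getD_lt2 n 0 h (by omega)]; simp)]
  rw [show sieveStepA n ((((Array.replicate n true).setIfInBounds 0 false).setIfInBounds 1 false), ([] : List Nat)) 1
        = ((((Array.replicate n true).setIfInBounds 0 false).setIfInBounds 1 false), ([] : List Nat)) by
      unfold sieveStepA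
      exact if_neg (by rw [initA_getD_lt2 n 1 h (by omega)]; simp)]

theorem sieveB_eq (n : Nat) (h : 2 ≤ n) : sieveB n = (sieveA n).1 := by
  rw [sieveA_eq_range' n h, fold_fst_eq]
  unfold sieveB
  rw [Nat.max_eq_left h]

theorem mem_primesA (n : Nat) (h : 2 ≤ n) (m : Nat) :
    m ∈ (sieveA n).2 ↔ (sieveA n).1.getD m false = true := by
  have hbase : ∀ j, j ∈ ([] : List Nat) ↔
      (j < 2 ∧ ((((Array.replicate n true).setIfInBounds 0 false).setIfInBounds 1 false)).getD j false = true) := by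
    intro j
    simp only [List.not_mem_nil, false_iff, not_and]
    intro hj
    rw [initA_getD_lt2 n j h hj]
    simp
  obtain ⟨hmem, -⟩ := sieve_inv n (n - 2) 2 _ [] (le_refl 2) hbase
  rw [sieveA_eq_range' n h]
  rw [hmem m]
  constructor
  · rintro ⟨-, hL⟩; exact hL
  · intro hL
    refine ⟨?_, hL⟩
    have := getD_true_lt hL
    rw [fold_fst_size] at this
    simp at this
    omega

theorem primesA_low (n : Nat) (h : 2 ≤ n) (j : Nat) (hj : j < 2) :
    (sieveA n).1.getD j false = false := by
  have hbase : ∀ j, j ∈ ([] : List Nat) ↔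
      (j < 2 ∧ ((((Array.replicate n true).setIfInBounds 0 false).setIfInBounds 1 false)).getD j false = true) := by
    intro j
    simp only [List.not_mem_nil, false_iff, not_and]
    intro hj
    rw [initA_getD_lt2 n j h hj]
    simp
  obtain ⟨-, hstab⟩ := sieve_inv n (n - 2) 2 _ [] (le_refl 2) hbase
  rw [sieveA_eq_range' n h, hstab j false hj, initA_getD_lt2 n j h hj]

theorem getD_replicate_false (k m : Nat) : (Array.replicate k false).getD m false = false := by
  rw [Array.getD_eq_getD_getElem?, Array.getElem?_replicate]
  split <;> rfl

theorem exprB_fold (n : Nat) (prime : Array Bool) (l : List Nat) (e : Array Bool)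
    (hlen : n ≤ e.size) (m : Nat) :
    ((l.foldl (fun e p => if prime.getD p false then markExpr e p n 1 else e) e).getD m false = true
      ↔ e.getD m false = true ∨
        ∃ p ∈ l, prime.getD p false = true ∧ ∃ x, 1 ≤ x ∧ p + 2 * x * x = m ∧ m < n) := by
  induction l generalizing e with
  | nil => simp
  | cons p t ih =>
    simp only [List.foldl_cons]
    by_cases hp : prime.getD p false = true
    · rw [if_pos hp, ih _ (by rw [markExpr_size]; exact hlen)]
      rw [markExpr_getD e p n 1 m hlen]
      constructor
      · rintro ((he | ⟨x, hx, hpx, hmn⟩) | ⟨q, hq, hqp, hx⟩)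
        · exact Or.inl he
        · exact Or.inr ⟨p, List.mem_cons_self, hp, x, hx, hpx, hmn⟩
        · exact Or.inr ⟨q, List.mem_cons_of_mem _ hq, hqp, hx⟩
      · rintro (he | ⟨q, hq, hqp, x, hx, hqx, hmn⟩)
        · exact Or.inl (Or.inl he)
        · rcases List.mem_cons.mp hq with rfl | hq'
          · exact Or.inl (Or.inr ⟨x, hx, hqx, hmn⟩)
          · exact Or.inr ⟨q, hq', hqp, x, hx, hqx, hmn⟩
    · rw [if_neg hp, ih _ hlen]
      constructor
      · rintro (he | ⟨q, hq, hqp, hx⟩)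
        · exact Or.inl he
        · exact Or.inr ⟨q, List.mem_cons_of_mem _ hq, hqp, hx⟩
      · rintro (he | ⟨q, hq, hqp, hx⟩)
        · exact Or.inl he
        · rcases List.mem_cons.mp hq with rfl | hq'
          · exact absurd hqp hp
          · exact Or.inr ⟨q, hq', hqp, hx⟩

theorem exprB_getD (n : Nat) (h2 : 2 ≤ n) (prime : Array Bool) (m : Nat) :
    ((exprB n prime).getD m false = true ↔
      ∃ p, (2 ≤ p ∧ p < n) ∧ prime.getD p false = true ∧
        ∃ x, 1 ≤ x ∧ p + 2 * x * x = m ∧ m < n) := by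
  unfold exprB
  rw [exprB_fold n prime _ _ (by simp)]
  rw [getD_replicate_false]
  simp only [Bool.false_eq_true, false_or]
  constructor
  · rintro ⟨p, hp, hrest⟩
    rw [List.mem_range'_1] at hp
    exact ⟨p, ⟨hp.1, by omega⟩, hrest⟩
  · rintro ⟨p, ⟨hp1, hp2⟩, hrest⟩
    exact ⟨p, List.mem_range'_1.mpr ⟨hp1, by omega⟩, hrest⟩

theorem contains_primes (n m : Nat) :
    PySem.Set.contains (PySem.Set.ofList (sieveA n).2) m = true ↔ m ∈ (sieveA n).2 := by
  show List.contains _ m = true ↔ _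
  rw [List.contains_iff_mem]
  exact PySem.Set.mem_ofList _ m

theorem containsA_eq (n num : Nat) (h2 : 2 ≤ n) :
    PySem.Set.contains (PySem.Set.ofList (sieveA n).2) num = (sieveB n).getD num false := by
  rw [Bool.eq_iff_iff, contains_primes, mem_primesA n h2, sieveB_eq n h2]

theorem scan_iff_expr (n num : Nat) (h2 : 2 ≤ n) (hnum : num < n) :
    (scanSq (PySem.Set.ofList (sieveA n).2) num (sqList n 1) = true)
      ↔ ((exprB n (sieveB n)).getD num false = false) := by
  rw [scanSq_sqList, Bool.eq_false_iff, Ne, exprB_getD n h2]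
  apply not_congr
  constructor
  · rintro ⟨s, hs, hslt, hcont⟩
    have hmem : (num - s) ∈ (sieveA n).2 := (contains_primes n _).mp hcont
    have harr : (sieveA n).1.getD (num - s) false = true := (mem_primesA n h2 _).mp hmem
    have hp2 : 2 ≤ num - s := by
      by_contra hc
      rw [primesA_low n h2 _ (by omega)] at harr
      simp at harr
    obtain ⟨t, ht1, rfl, -⟩ := (sqList_mem n 1 s).mp hs
    refine ⟨num - 2 * t * t, ⟨hp2, by omega⟩, by rw [sieveB_eq n h2]; exact harr,
      t, ht1, by omega, hnum⟩
  · rintro ⟨p, ⟨hp2, hpn⟩, hprime, x, hx1, hpx, hmn⟩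
    refine ⟨2 * x * x, (sqList_mem n 1 _).mpr ⟨x, hx1, rfl, by omega⟩, by omega, ?_⟩
    rw [show num - 2 * x * x = p by omega, contains_primes, mem_primesA n h2]
    rw [sieveB_eq n h2] at hprime
    exact hprime

theorem pyRange_two_cons (a b : Int) (h : a < b) :
    PySem.List.pyRange a b 2 = a :: PySem.List.pyRange (a + 2) b 2 := by
  rw [PySem.List.pyRange_of_pos a b (by norm_num),
    PySem.List.pyRange_of_pos (a + 2) b (by norm_num)]
  rw [if_pos h]
  by_cases h2 : a + 2 < b
  · rw [if_pos h2]
    rw [show ((b - a + 2 - 1) / 2).toNat = ((b - (a + 2) + 2 - 1) / 2).toNat + 1 by omega]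
    rw [List.range_succ_eq_map]
    simp only [List.map_cons, List.map_map]
    congr 1
    · simp
    · apply List.map_congr_left
      intro k _
      simp only [Function.comp_apply]
      push_cast
      ring
  · rw [if_neg h2]
    rw [show ((b - a + 2 - 1) / 2).toNat = 1 by omega]
    simp

theorem pyRange_two_nil (a b : Int) (h : b ≤ a) : PySem.List.pyRange a b 2 = [] := by
  rw [PySem.List.pyRange_of_pos a b (by norm_num), if_neg (by omega)]
  simp

theorem outer_eq (n : Nat) (h2 : 2 ≤ n) (num : Nat) :
    outerA n (PySem.Set.ofList (sieveA n).2) (sqList n 1) num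
      = (PySem.List.pyRange (num : Int) (n : Int) 2).find?
          (fun m => !(sieveB n).getD m.toNat false && !(exprB n (sieveB n)).getD m.toNat false) := by
  rw [outerA]
  split
  · rename_i hlt
    rw [pyRange_two_cons _ _ (by exact_mod_cast hlt), List.find?_cons]
    have htn : ((num : Int)).toNat = num := Int.toNat_natCast num
    rw [containsA_eq n num h2]
    by_cases hA : (sieveB n).getD num false = true
    · rw [if_pos hA]
      rw [show (!(sieveB n).getD (num : Int).toNat false &&
          !(exprB n (sieveB n)).getD (num : Int).toNat false) = false by
        simp [htn, hA]]
      rw [show ((num : Int) + 2) = ((num + 2 : Nat) : Int) by push_cast; ring]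
      exact outer_eq n h2 (num + 2)
    · rw [if_neg hA]
      replace hA : (sieveB n).getD num false = false := by
        cases h : (sieveB n).getD num false
        · rfl
        · exact absurd h hA
      by_cases hs : scanSq (PySem.Set.ofList (sieveA n).2) num (sqList n 1) = true
      · rw [if_pos hs]
        have hexpr : (exprB n (sieveB n)).getD num false = false :=
          (scan_iff_expr n num h2 hlt).mp hs
        rw [show (!(sieveB n).getD (num : Int).toNat false &&
            !(exprB n (sieveB n)).getD (num : Int).toNat false) = true by
          simp [htn, hA, hexpr]]
      · rw [if_neg hs]
        have hexpr : (exprB n (sieveB n)).getD num false = true := by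
          cases h : (exprB n (sieveB n)).getD num false
          · exact absurd ((scan_iff_expr n num h2 hlt).mpr h) hs
          · rfl
        rw [show (!(sieveB n).getD (num : Int).toNat false &&
            !(exprB n (sieveB n)).getD (num : Int).toNat false) = false by
          simp [htn, hexpr]]
        rw [show ((num : Int) + 2) = ((num + 2 : Nat) : Int) by push_cast; ring]
        exact outer_eq n h2 (num + 2)
  · rename_i hge
    rw [pyRange_two_nil _ _ (by exact_mod_cast Nat.le_of_not_lt hge)]
    rfl
termination_by n - num
decreasing_by all_goals omega

-- ===== VERDICT (by name: the statement is the Claim_ definition above) =====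
theorem solution_spec : Claim_equal_solution := by
  intro limit _ hpre
  obtain ⟨h2, -⟩ := hpre
  unfold Spec_solution solution solution_alt
  have hn2 : 2 ≤ limit.toNat := by omega
  have hlim : ((limit.toNat : Int)) = limit := Int.toNat_of_nonneg (by omega)
  rw [show (9 : Int) = ((9 : Nat) : Int) by norm_num, ← hlim]
  exact outer_eq limit.toNat hn2 9
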